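-- pv_equiv track=rewrite | github.com/changjian-github/PISTS-for-OpM | nbh.py | neighbor_current2back
-- ===== SOURCE A (Python) =====
-- def neighbor_current2back(curr_sol):
--     back_sols = []
--     for i in curr_sol:
--         back_sol = list(curr_sol)
--         back_sol.remove(i)
--         back_sol = tuple(sorted(back_sol))
--         back_sols.append(back_sol)
--         pass
--     return back_sols
-- ===== SOURCE B (Python) =====
-- def neighbor_current2back(curr_sol):
--     base = sorted(curr_sol)
--     back_sols = []
--     for x in curr_sol:
--         k = base.index(x)
--         back_sols.append(tuple(base[:k] + base[k + 1:]))
--     return back_sols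
-- ===== Notes on version B (the rewrite author's own statement) =====
-- stated objective: faster
-- what changed: Sort once up front, then build each row by deleting one occurrence from the pre-sorted list (index + two slices) instead of copying, removing and re-sorting for every element.
import Mathlib
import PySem

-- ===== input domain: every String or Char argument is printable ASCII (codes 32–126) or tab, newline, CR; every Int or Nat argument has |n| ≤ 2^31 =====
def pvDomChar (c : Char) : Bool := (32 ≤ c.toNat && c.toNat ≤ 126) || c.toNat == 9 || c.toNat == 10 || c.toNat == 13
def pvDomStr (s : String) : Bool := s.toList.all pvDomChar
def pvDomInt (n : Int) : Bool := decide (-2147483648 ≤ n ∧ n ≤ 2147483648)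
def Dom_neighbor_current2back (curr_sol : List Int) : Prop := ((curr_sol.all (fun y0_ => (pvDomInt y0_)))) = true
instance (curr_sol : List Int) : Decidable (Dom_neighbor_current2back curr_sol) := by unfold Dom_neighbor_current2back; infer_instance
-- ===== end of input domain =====

-- B sorts the input once and builds each row by deleting one occurrence from the pre-sorted
-- list (index + two slices) instead of copying, removing and re-sorting per element (objective: faster).

-- ===== PORT A =====
-- back_sol.remove(i) cannot raise: i is drawn from curr_sol, so remove? is always `some`
-- (the .getD [] default is unreachable).
def neighbor_current2back (curr_sol : List Int) : List (List Int) :=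
  curr_sol.foldl (fun back_sols i =>
    back_sols ++ [PySem.List.sorted ((PySem.List.remove? curr_sol i).getD []) (fun x => x) false]) []

-- ===== PORT B =====
-- base.index(x) cannot raise: x is drawn from curr_sol, hence is in base (the .getD 0 default
-- is unreachable).
def neighbor_current2back_alt (curr_sol : List Int) : List (List Int) :=
  let base := PySem.List.sorted curr_sol (fun x => x) false
  curr_sol.foldl (fun back_sols x =>
    let k : Nat := (PySem.List.index? base x).getD 0
    back_sols ++ [PySem.List.slice base none (some (k : Int)) ++
                  PySem.List.slice base (some ((k : Int) + 1)) none]) []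

-- ===== PRECONDITION & SPEC =====
def Spec_neighbor_current2back (curr_sol : List Int) (out : List (List Int)) : Prop := out = neighbor_current2back_alt curr_sol
instance (curr_sol : List Int) (out : List (List Int)) : Decidable (Spec_neighbor_current2back curr_sol out) := by unfold Spec_neighbor_current2back; infer_instance

-- ===== CLAIM (what is proved, stated in full; the proofs are below) =====
def Claim_equal_neighbor_current2back : Prop := ∀ (curr_sol : List Int), Dom_neighbor_current2back curr_sol → Spec_neighbor_current2back curr_sol (neighbor_current2back curr_sol)

-- ===== LEMMAS AND PROOFS =====

-- sorted(l with one x removed) = (sorted l) with one x removed, for x ∈ l.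
theorem sorted_erase_eq (l : List Int) (x : Int) (_hx : x ∈ l) :
    PySem.List.sorted (l.erase x) (fun x => x) false
      = (PySem.List.sorted l (fun x => x) false).erase x := by
  apply PySem.List.sorted_id_eq_of_perm_of_pairwise
  · exact (PySem.List.sorted_perm l (fun x => x) false).erase x
  · exact (PySem.List.sorted_pairwise l (fun x => x)).sublist (List.erase_sublist ..)

-- One row of B: the two slices around index k delete the first occurrence of x from base.
theorem row_alt_eq (l : List Int) (x : Int) (hx : x ∈ l) :
    (let base := PySem.List.sorted l (fun x => x) false
     let k : Nat := (PySem.List.index? base x).getD 0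
     PySem.List.slice base none (some (k : Int)) ++
       PySem.List.slice base (some ((k : Int) + 1)) none)
      = (PySem.List.sorted l (fun x => x) false).erase x := by
  set base := PySem.List.sorted l (fun x => x) false with hbase
  have hxb : x ∈ base := (PySem.List.mem_sorted ..).mpr hx
  obtain ⟨k0, hk0⟩ : ∃ k0, PySem.List.index? base x = some k0 :=
    Option.isSome_iff_exists.mp ((PySem.List.index?_isSome_iff ..).mpr hxb)
  simp only [hk0, Option.getD_some]
  have h1 : PySem.List.slice base none (some (k0 : Int)) = base.take k0 :=
    PySem.List.slice_to_natCast ..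
  have hcast : ((k0 : Int) + 1) = ((k0 + 1 : Nat) : Int) := by push_cast; ring
  have h2 : PySem.List.slice base (some ((k0 : Int) + 1)) none = base.drop (k0 + 1) := by
    rw [hcast]; exact PySem.List.slice_from_natCast ..
  rw [h1, h2]
  have hidx : List.idxOf? x base = some k0 := by
    rw [← PySem.List.index?_eq_idxOf?]; exact hk0
  rw [List.erase_eq_eraseIdx, hidx]
  simp [List.eraseIdx_eq_take_drop_succ]

theorem rows_eq (l : List Int) (x : Int) (hx : x ∈ l) :
    PySem.List.sorted ((PySem.List.remove? l x).getD []) (fun x => x) false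
      = (let base := PySem.List.sorted l (fun x => x) false
         let k : Nat := (PySem.List.index? base x).getD 0
         PySem.List.slice base none (some (k : Int)) ++
           PySem.List.slice base (some ((k : Int) + 1)) none) := by
  rw [PySem.List.remove?_eq_some_erase l x hx, Option.getD_some, row_alt_eq l x hx,
    sorted_erase_eq l x hx]

-- ===== VERDICT (by name: the statement is the Claim_ definition above) =====
theorem neighbor_current2back_spec : Claim_equal_neighbor_current2back := by
  intro curr_sol _
  unfold Spec_neighbor_current2back neighbor_current2back neighbor_current2back_alt
  rw [PySem.List.foldl_append_singleton_eq_map, PySem.List.foldl_append_singleton_eq_map]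
  exact List.map_congr_left (fun x hx => rows_eq curr_sol x hx)
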